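-- pv_equiv track=rewrite | github.com/davidmb12/Bio_ProyectoFinal | V_01/main.py | get_emissions
-- ===== SOURCE A (Python) =====
-- def get_emissions(seq, match_cols):
--     emissions = []
--     match_index = 0
--     last_match_index = None
--     ncol = len(seq)
--     for j in range(ncol):
--         if j in match_cols:
--             match_index +=1
--             if seq[j] != '-':
--                 state = f'M{match_index}'
--                 emissions.append((state,seq[j]))
--             # Si es gap, se considera delecion (no emite)
--             last_match_index = match_index
--         else:
--             # Columna de insercion: si hay residuo, emite
--             if seq[j] !='-':
--                 ins_state=f'I{last_match_index if last_match_index is not None else 0}'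
--                 emissions.append((ins_state,seq[j]))
--     return emissions
-- ===== SOURCE B (Python) =====
-- def get_emissions(seq, match_cols):
--     mc = set(match_cols)
--     ranks = []
--     c = 0
--     for j in range(len(seq)):
--         if j in mc:
--             c += 1
--         ranks.append(c)
--     return [(('M' if j in mc else 'I') + str(ranks[j]), ch)
--             for j, ch in enumerate(seq) if ch != '-']
-- ===== Notes on version B (the rewrite author's own statement) =====
-- stated objective: alternative
-- what changed: Replaces the running match_index/last_match_index-None bookkeeping with a precomputed prefix-rank array (ranks[j] = number of match columns at or before j) plus a single comprehension over enumerate(seq), and hashes match_cols into a set.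
import Mathlib
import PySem

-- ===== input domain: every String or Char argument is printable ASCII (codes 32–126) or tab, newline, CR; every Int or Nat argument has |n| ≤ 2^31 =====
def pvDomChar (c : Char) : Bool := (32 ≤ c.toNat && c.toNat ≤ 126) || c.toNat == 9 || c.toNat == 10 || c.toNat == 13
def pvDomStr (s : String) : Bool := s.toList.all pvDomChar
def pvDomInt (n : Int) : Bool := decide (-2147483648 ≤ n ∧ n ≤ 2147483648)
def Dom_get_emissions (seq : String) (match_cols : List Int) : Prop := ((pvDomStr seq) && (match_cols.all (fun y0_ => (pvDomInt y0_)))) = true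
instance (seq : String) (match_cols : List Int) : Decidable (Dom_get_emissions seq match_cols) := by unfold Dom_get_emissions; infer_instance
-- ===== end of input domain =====

-- B replaces A's running match_index/last_match_index bookkeeping with a prefix-rank array and one comprehension (alternative decomposition; set membership).
-- ===== PORT A =====
def get_emissions (seq : String) (match_cols : List Int) : List (String × String) :=
  let cs := seq.toList
  let ncol := cs.length
  ((PySem.List.pyRange 0 (ncol : Int) 1).foldl
    (fun (st : List (String × String) × Int × Option Int) j =>
      if j ∈ match_cols then
        let mi := st.2.1 + 1
        let em :=
          if PySem.List.pyGetD cs j ' ' ≠ '-' then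
            st.1 ++ [("M" ++ PySem.Int.toStr mi, String.ofList [PySem.List.pyGetD cs j ' '])]
          else st.1
        (em, mi, some mi)
      else
        if PySem.List.pyGetD cs j ' ' ≠ '-' then
          (st.1 ++ [("I" ++ PySem.Int.toStr (st.2.2.getD 0), String.ofList [PySem.List.pyGetD cs j ' '])],
            st.2.1, st.2.2)
        else st)
    ([], 0, none)).1

-- ===== PORT B =====
def get_emissions_alt (seq : String) (match_cols : List Int) : List (String × String) :=
  let cs := seq.toList
  let mc := PySem.Set.ofList match_cols
  let ranks := ((PySem.List.pyRange 0 (cs.length : Int) 1).foldl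
      (fun (st : List Int × Int) j =>
        let c := if j ∈ mc then st.2 + 1 else st.2
        (st.1 ++ [c], c)) ([], 0)).1
  ((PySem.List.enumerate cs 0).filter (fun jc => jc.2 ≠ '-')).map
    (fun jc => ((if jc.1 ∈ mc then "M" else "I") ++ PySem.Int.toStr (PySem.List.pyGetD ranks jc.1 0),
      String.ofList [jc.2]))

-- ===== PRECONDITION & SPEC =====
def Spec_get_emissions (seq : String) (match_cols : List Int) (out : List (String × String)) : Prop := out = get_emissions_alt seq match_cols
instance (seq : String) (match_cols : List Int) (out : List (String × String)) : Decidable (Spec_get_emissions seq match_cols out) := by unfold Spec_get_emissions; infer_instance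

-- ===== CLAIM (what is proved, stated in full; the proofs are below) =====
def Claim_equal_get_emissions : Prop := ∀ (seq : String) (match_cols : List Int), Dom_get_emissions seq match_cols → Spec_get_emissions seq match_cols (get_emissions seq match_cols)

-- ===== LEMMAS AND PROOFS =====

/-- number of match columns strictly below `k` -/
def pvPref (mc : List Int) (k : Nat) : Int :=
  ((List.range k).countP (fun i => decide ((i : Int) ∈ mc)) : Int)

/-- common reference recursion: walk the suffix `t` from column `a` with `c` matches seen so far -/
def pvSpec (mc : List Int) : List Char → Int → Int → List (String × String)
  | [], _, _ => []
  | ch :: t, a, c =>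
    (if ch ≠ '-' then
        [((if a ∈ mc then "M" else "I") ++ PySem.Int.toStr (if a ∈ mc then c + 1 else c),
          String.ofList [ch])]
      else []) ++ pvSpec mc t (a + 1) (if a ∈ mc then c + 1 else c)

lemma pvPref_succ (mc : List Int) (k : Nat) :
    pvPref mc (k + 1) = if (k : Int) ∈ mc then pvPref mc k + 1 else pvPref mc k := by
  simp [pvPref, List.range_succ, List.countP_append]
  split_ifs <;> simp

lemma pvRanks (mc : List Int) : ∀ (n : Nat),
    (PySem.List.pyRange 0 (n : Int) 1).foldl
      (fun (st : List Int × Int) j =>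
        let c := if j ∈ PySem.Set.ofList mc then st.2 + 1 else st.2
        (st.1 ++ [c], c)) ([], 0)
    = ((List.range n).map (fun k => pvPref mc (k + 1)), pvPref mc n) := by
  intro n
  induction n with
  | zero => simp [PySem.List.pyRange_one_eq_nil, pvPref]
  | succ n ih =>
    have h : ((n + 1 : Nat) : Int) = (n : Int) + 1 := by push_cast; ring
    rw [h, PySem.List.pyRange_one_succ_right (by omega), List.foldl_append, ih]
    simp [List.range_succ, pvPref_succ, PySem.Set.mem_ofList]

lemma pvAside (mc : List Int) : ∀ (t : List Char) (a : Int)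
    (em : List (String × String)) (mi : Int) (lm : Option Int), lm.getD 0 = mi →
    ((PySem.List.enumerate t a).foldl
      (fun (st : List (String × String) × Int × Option Int) jc =>
        if jc.1 ∈ mc then
          let mi := st.2.1 + 1
          let em :=
            if jc.2 ≠ '-' then st.1 ++ [("M" ++ PySem.Int.toStr mi, String.ofList [jc.2])] else st.1
          (em, mi, some mi)
        else
          if jc.2 ≠ '-' then
            (st.1 ++ [("I" ++ PySem.Int.toStr (st.2.2.getD 0), String.ofList [jc.2])], st.2.1, st.2.2)
          else st)
      (em, mi, lm)).1 = em ++ pvSpec mc t a mi := by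
  intro t
  induction t with
  | nil => intro a em mi lm hlm; simp [pvSpec]
  | cons ch t ih =>
    intro a em mi lm hlm
    rw [PySem.List.enumerate_cons, List.foldl_cons]
    by_cases hm : a ∈ mc
    · by_cases hc : ch = '-'
      · simp only [hm, hc, ne_eq, not_true_eq_false, if_false, ite_true, ite_false]
        rw [ih _ _ _ _ (by simp)]
        simp [pvSpec, hm, hc]
      · simp only [hm, hc, ne_eq, not_false_eq_true, ite_true, ite_false]
        rw [ih _ _ _ _ (by simp)]
        simp [pvSpec, hm, hc]
    · by_cases hc : ch = '-'
      · simp only [hm, hc, ne_eq, not_true_eq_false, if_false, ite_true, ite_false]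
        rw [ih _ _ _ _ hlm]
        simp [pvSpec, hm, hc]
      · simp only [hm, hc, ne_eq, not_false_eq_true, ite_true, ite_false, hlm]
        rw [ih _ _ _ _ hlm]
        simp [pvSpec, hm, hc]

lemma pvBside (mc : List Int) (ranks : List Int)
    (hr : ranks = (List.range ranks.length).map (fun k => pvPref mc (k + 1))) :
    ∀ (t : List Char) (k : Nat), k + t.length = ranks.length →
    ((PySem.List.enumerate t (k : Int)).filter (fun jc => jc.2 ≠ '-')).map
      (fun jc => ((if jc.1 ∈ PySem.Set.ofList mc then "M" else "I") ++
          PySem.Int.toStr (PySem.List.pyGetD ranks jc.1 0), String.ofList [jc.2]))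
    = pvSpec mc t (k : Int) (pvPref mc k) := by
  intro t
  induction t with
  | nil => intro k hk; simp [pvSpec]
  | cons ch t ih =>
    intro k hk
    have hk1 : k < ranks.length := by simp at hk; omega
    have hget : PySem.List.pyGetD ranks (k : Int) 0 = pvPref mc (k + 1) := by
      rw [PySem.List.pyGetD_natCast, hr]
      rw [List.getD_eq_getElem _ _ (by simpa using hk1)]
      simp
    have hnext : ((k : Int) + 1) = ((k + 1 : Nat) : Int) := by push_cast; ring
    have hih := ih (k + 1) (by simp at hk ⊢; omega)
    rw [← hnext] at hih
    rw [PySem.List.enumerate_cons, List.filter_cons]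
    by_cases hc : ch = '-'
    · simp only [hc, ne_eq, not_true_eq_false, decide_false, Bool.false_eq_true, if_false,
        ite_false]
      rw [hih, pvPref_succ]
      simp only [pvSpec, hc, ne_eq, not_true_eq_false, ite_false, List.nil_append, hnext]
    · simp only [hc, ne_eq, not_false_eq_true, decide_true, if_true, ite_true, List.map_cons]
      rw [hih, hget, pvPref_succ]
      simp only [pvSpec, hc, ne_eq, not_false_eq_true, ite_true, List.cons_append,
        List.nil_append, PySem.Set.mem_ofList, hnext]

-- ===== VERDICT (by name: the statement is the Claim_ definition above) =====
theorem get_emissions_spec : Claim_equal_get_emissions := by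
  intro seq match_cols _
  unfold Spec_get_emissions
  simp only [get_emissions, get_emissions_alt]
  rw [pvRanks match_cols seq.toList.length]
  have hA := pvAside match_cols seq.toList 0 [] 0 none rfl
  rw [PySem.List.enumerate_eq_map_pyRange seq.toList ' ', List.foldl_map] at hA
  simp only [PySem.List.len_eq] at hA
  have hB := pvBside match_cols ((List.range seq.toList.length).map (fun k => pvPref match_cols (k + 1)))
    (by simp) seq.toList 0 (by simp)
  simp only [Nat.cast_zero] at hB
  rw [hA, hB]
  simp [pvPref]
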